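-- pv_equiv track=rewrite | github.com/muppetbrown/mana_meeples_boardgame_list | bgg_service.py | _determine_game_type
-- ===== SOURCE A (Python) =====
-- from typing import Dict, List, Optional
--
-- def _determine_game_type(categories: List[str], mechanics: List[str]) -> str:
--     """
--     Determine game type based on categories and mechanics
--     Enhanced version of your classification system
--     """
--     # Primary game types (most recognizable)
--     primary_types = {
--         'party': ['party game'],
--         'family': ['children\'s game', 'family game'],
--         'coop': ['cooperative game'],
--         'social_deduction': ['social deduction', 'bluffing', 'deduction'],
--         'dexterity': ['dexterity', 'real time'],
--         'trivia': ['trivia'],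
--         'abstract': ['abstract strategy'],
--         'war': ['wargame', 'world war'],
--         'economic': ['economic'],
--         'thematic': ['thematic'],
--     }
--
--     # Check categories first for primary type
--     for game_type, keywords in primary_types.items():
--         for keyword in keywords:
--             if any(keyword in cat.lower() for cat in categories):
--                 type_names = {
--                     'party': 'Party',
--                     'family': 'Family',
--                     'coop': 'Co-op',
--                     'social_deduction': 'Social Deduction',
--                     'dexterity': 'Dexterity',
--                     'trivia': 'Trivia',
--                     'abstract': 'Abstract',
--                     'war': 'War Game',
--                     'economic': 'Economic',
--                     'thematic': 'Thematic'
--                 }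
--                 return type_names[game_type]
--
--     # Check mechanics for cooperative games
--     if any('cooperative' in mech.lower() for mech in mechanics):
--         return 'Co-op'
--
--     # Mechanic-based classification
--     mechanic_priority = [
--         ('deck building', 'Deck Builder'),
--         ('bag building', 'Bag Builder'),
--         ('worker placement', 'Worker Placement'),
--         ('tile placement', 'Tile Laying'),
--         ('roll and write', 'Roll & Write'),
--         ('flip and write', 'Roll & Write'),
--         ('drafting', 'Drafting'),
--         ('trick-taking', 'Trick Taking'),
--         ('area control', 'Area Control'),
--         ('area majority', 'Area Control'),
--         ('route building', 'Route Building'),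
--         ('network building', 'Route Building'),
--         ('engine building', 'Engine Builder'),
--         ('tableau building', 'Engine Builder'),
--         ('pattern building', 'Pattern Builder'),
--         ('set collection', 'Set Collection'),
--         ('auction', 'Auction'),
--         ('trading', 'Trading'),
--     ]
--
--     for keyword, display_name in mechanic_priority:
--         if any(keyword in mech.lower() for mech in mechanics):
--             return display_name
--
--     # Fallback to strategy if nothing else matches
--     return 'Strategy'
-- ===== SOURCE B (Python) =====
-- # B: inverted decomposition — flat priority tables scanned once per input string;
-- # the smallest matching priority index across all inputs decides the name.
--
-- _CAT_TABLE = [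
--     ('party game', 'Party'),
--     ("children's game", 'Family'),
--     ('family game', 'Family'),
--     ('cooperative game', 'Co-op'),
--     ('social deduction', 'Social Deduction'),
--     ('bluffing', 'Social Deduction'),
--     ('deduction', 'Social Deduction'),
--     ('dexterity', 'Dexterity'),
--     ('real time', 'Dexterity'),
--     ('trivia', 'Trivia'),
--     ('abstract strategy', 'Abstract'),
--     ('wargame', 'War Game'),
--     ('world war', 'War Game'),
--     ('economic', 'Economic'),
--     ('thematic', 'Thematic'),
-- ]
--
-- _MECH_TABLE = [
--     ('cooperative', 'Co-op'),
--     ('deck building', 'Deck Builder'),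
--     ('bag building', 'Bag Builder'),
--     ('worker placement', 'Worker Placement'),
--     ('tile placement', 'Tile Laying'),
--     ('roll and write', 'Roll & Write'),
--     ('flip and write', 'Roll & Write'),
--     ('drafting', 'Drafting'),
--     ('trick-taking', 'Trick Taking'),
--     ('area control', 'Area Control'),
--     ('area majority', 'Area Control'),
--     ('route building', 'Route Building'),
--     ('network building', 'Route Building'),
--     ('engine building', 'Engine Builder'),
--     ('tableau building', 'Engine Builder'),
--     ('pattern building', 'Pattern Builder'),
--     ('set collection', 'Set Collection'),
--     ('auction', 'Auction'),
--     ('trading', 'Trading'),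
-- ]
--
--
-- def _first_idx(table, lowered):
--     for i, (kw, _name) in enumerate(table):
--         if kw in lowered:
--             return i
--     return None
--
--
-- def _best_idx(table, items):
--     best = None
--     for item in items:
--         i = _first_idx(table, item.lower())
--         if i is not None and (best is None or i < best):
--             best = i
--     return best
--
--
-- def _determine_game_type(categories, mechanics):
--     i = _best_idx(_CAT_TABLE, categories)
--     if i is not None:
--         return _CAT_TABLE[i][1]
--     j = _best_idx(_MECH_TABLE, mechanics)
--     if j is not None:
--         return _MECH_TABLE[j][1]
--     return 'Strategy'
-- ===== Notes on version B (the rewrite author's own statement) =====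
-- stated objective: alternative
-- what changed: Replaced A's keyword-outer/input-inner nested scans (grouped dict of keyword lists plus a separate cooperative check and a second keyword loop) by two flat ordered keyword->name priority tables scanned once per input string, returning the name at the smallest matching priority index per phase.
import Mathlib
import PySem

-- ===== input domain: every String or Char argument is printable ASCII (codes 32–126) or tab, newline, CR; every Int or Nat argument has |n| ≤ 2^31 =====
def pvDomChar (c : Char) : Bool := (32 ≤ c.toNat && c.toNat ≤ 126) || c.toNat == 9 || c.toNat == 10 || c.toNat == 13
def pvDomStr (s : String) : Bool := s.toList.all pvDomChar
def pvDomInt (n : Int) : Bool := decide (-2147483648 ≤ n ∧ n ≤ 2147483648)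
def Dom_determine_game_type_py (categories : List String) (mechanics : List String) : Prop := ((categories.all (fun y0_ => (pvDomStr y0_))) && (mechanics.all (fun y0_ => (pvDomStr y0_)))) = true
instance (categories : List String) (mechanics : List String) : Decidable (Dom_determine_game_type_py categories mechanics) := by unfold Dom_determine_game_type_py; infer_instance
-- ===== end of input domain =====

-- B replaces A's keyword-outer/input-inner nested scans by flat priority tables scanned
-- once per input string, returning the name at the smallest matching priority index
-- (objective: alternative decomposition; same asymptotic cost).


-- ===== PORT A =====

-- primary_types dict, in insertion order
def pvPrimaryTypes : List (String × List String) :=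
  [("party", ["party game"]),
   ("family", ["children's game", "family game"]),
   ("coop", ["cooperative game"]),
   ("social_deduction", ["social deduction", "bluffing", "deduction"]),
   ("dexterity", ["dexterity", "real time"]),
   ("trivia", ["trivia"]),
   ("abstract", ["abstract strategy"]),
   ("war", ["wargame", "world war"]),
   ("economic", ["economic"]),
   ("thematic", ["thematic"])]

-- type_names dict
def pvTypeNames : PySem.Dict String String := PySem.Dict.ofList
  [("party", "Party"), ("family", "Family"), ("coop", "Co-op"),
   ("social_deduction", "Social Deduction"), ("dexterity", "Dexterity"),
   ("trivia", "Trivia"), ("abstract", "Abstract"), ("war", "War Game"),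
   ("economic", "Economic"), ("thematic", "Thematic")]

-- mechanic_priority list
def pvMechanicPriority : List (String × String) :=
  [("deck building", "Deck Builder"), ("bag building", "Bag Builder"),
   ("worker placement", "Worker Placement"), ("tile placement", "Tile Laying"),
   ("roll and write", "Roll & Write"), ("flip and write", "Roll & Write"),
   ("drafting", "Drafting"), ("trick-taking", "Trick Taking"),
   ("area control", "Area Control"), ("area majority", "Area Control"),
   ("route building", "Route Building"), ("network building", "Route Building"),
   ("engine building", "Engine Builder"), ("tableau building", "Engine Builder"),
   ("pattern building", "Pattern Builder"), ("set collection", "Set Collection"),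
   ("auction", "Auction"), ("trading", "Trading")]

-- inner loop: 'for keyword in keywords: if any(keyword in cat.lower() ...): return type_names[game_type]'
-- (type_names[game_type]: the key is always present, so the .getD "" default is never used)
def pvKwScanA (gameType : String) : List String → List String → Option String
  | [], _ => none
  | kw :: kws, categories =>
    if categories.any (fun cat => PySem.Str.isIn kw (PySem.Str.lower cat)) then
      some ((PySem.Dict.get? pvTypeNames gameType).getD "")
    else pvKwScanA gameType kws categories

-- outer loop: 'for game_type, keywords in primary_types.items(): ...'
def pvCatScanA : List (String × List String) → List String → Option String
  | [], _ => none
  | (gameType, kws) :: rest, categories =>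
    match pvKwScanA gameType kws categories with
    | some r => some r
    | none => pvCatScanA rest categories

-- 'for keyword, display_name in mechanic_priority: ...' with the final 'return Strategy'
def pvMechScanA : List (String × String) → List String → String
  | [], _ => "Strategy"
  | (kw, nm) :: rest, mechanics =>
    if mechanics.any (fun mech => PySem.Str.isIn kw (PySem.Str.lower mech)) then nm
    else pvMechScanA rest mechanics

def determine_game_type_py (categories : List String) (mechanics : List String) : String :=
  match pvCatScanA pvPrimaryTypes categories with
  | some r => r
  | none =>
    if mechanics.any (fun mech => PySem.Str.isIn "cooperative" (PySem.Str.lower mech)) then "Co-op"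
    else pvMechScanA pvMechanicPriority mechanics

-- ===== PORT B =====

def pvCatTable : List (String × String) :=
  [("party game", "Party"), ("children's game", "Family"), ("family game", "Family"),
   ("cooperative game", "Co-op"), ("social deduction", "Social Deduction"),
   ("bluffing", "Social Deduction"), ("deduction", "Social Deduction"),
   ("dexterity", "Dexterity"), ("real time", "Dexterity"), ("trivia", "Trivia"),
   ("abstract strategy", "Abstract"), ("wargame", "War Game"), ("world war", "War Game"),
   ("economic", "Economic"), ("thematic", "Thematic")]

def pvMechTable : List (String × String) :=
  [("cooperative", "Co-op"), ("deck building", "Deck Builder"), ("bag building", "Bag Builder"),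
   ("worker placement", "Worker Placement"), ("tile placement", "Tile Laying"),
   ("roll and write", "Roll & Write"), ("flip and write", "Roll & Write"),
   ("drafting", "Drafting"), ("trick-taking", "Trick Taking"),
   ("area control", "Area Control"), ("area majority", "Area Control"),
   ("route building", "Route Building"), ("network building", "Route Building"),
   ("engine building", "Engine Builder"), ("tableau building", "Engine Builder"),
   ("pattern building", "Pattern Builder"), ("set collection", "Set Collection"),
   ("auction", "Auction"), ("trading", "Trading")]

-- _first_idx: index of the first table keyword contained in the lowered string
def pvFirstIdx : List (String × String) → String → Option Nat
  | [], _ => none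
  | (kw, _) :: rest, lowered =>
    if PySem.Str.isIn kw lowered then some 0
    else (pvFirstIdx rest lowered).map (· + 1)

-- 'if i is not None and (best is None or i < best): best = i'
def pvOmin : Option Nat → Option Nat → Option Nat
  | none, b => b
  | some a, none => some a
  | some a, some b => some (Nat.min a b)

-- _best_idx: smallest matching priority index over all items
def pvBestIdx (table : List (String × String)) (items : List String) : Option Nat :=
  items.foldl (fun best item => pvOmin best (pvFirstIdx table (PySem.Str.lower item))) none

def determine_game_type_py_alt (categories : List String) (mechanics : List String) : String :=
  match pvBestIdx pvCatTable categories with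
  | some i => (pvCatTable.getD i ("", "")).2
  | none =>
    match pvBestIdx pvMechTable mechanics with
    | some j => (pvMechTable.getD j ("", "")).2
    | none => "Strategy"

-- ===== PRECONDITION & SPEC =====
def Spec_determine_game_type_py (categories : List String) (mechanics : List String) (out : String) : Prop := out = determine_game_type_py_alt categories mechanics
instance (categories : List String) (mechanics : List String) (out : String) : Decidable (Spec_determine_game_type_py categories mechanics out) := by unfold Spec_determine_game_type_py; infer_instance

-- ===== CLAIM (what is proved, stated in full; the proofs are below) =====
def Claim_equal_determine_game_type_py : Prop := ∀ (categories : List String) (mechanics : List String), Dom_determine_game_type_py categories mechanics → Spec_determine_game_type_py categories mechanics (determine_game_type_py categories mechanics)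

-- ===== LEMMAS AND PROOFS =====

-- A-style first-match scan over a flat (keyword, name) table
def pvAFindFlat : List (String × String) → List String → Option String
  | [], _ => none
  | (kw, nm) :: rest, items =>
    if items.any (fun it => PySem.Str.isIn kw (PySem.Str.lower it)) then some nm
    else pvAFindFlat rest items

theorem pvOmin_none (a : Option Nat) : pvOmin a none = a := by
  cases a <;> rfl

theorem pvOmin_some_zero (a : Option Nat) : pvOmin a (some 0) = some 0 := by
  cases a <;> simp [pvOmin]

theorem pvOmin_zero_left (b : Option Nat) : pvOmin (some 0) b = some 0 := by
  cases b <;> simp [pvOmin]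

theorem pvFold_none (items : List String) (acc : Option Nat) :
    items.foldl (fun best _ => pvOmin best none) acc = acc := by
  induction items generalizing acc with
  | nil => rfl
  | cons x xs ih => rw [List.foldl_cons, pvOmin_none]; exact ih acc

theorem pvFold_zero_absorb (f : String → Option Nat) (items : List String) :
    items.foldl (fun best it => pvOmin best (f it)) (some 0) = some 0 := by
  induction items with
  | nil => rfl
  | cons x xs ih => rw [List.foldl_cons, pvOmin_zero_left]; exact ih

theorem pvFold_zero_wins (f : String → Option Nat) (items : List String) (acc : Option Nat)
    (h : ∃ c ∈ items, f c = some 0) :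
    items.foldl (fun best it => pvOmin best (f it)) acc = some 0 := by
  induction items generalizing acc with
  | nil => simp at h
  | cons x xs ih =>
    rcases h with ⟨c, hc, hfc⟩
    rcases List.mem_cons.mp hc with rfl | hmem
    · rw [List.foldl_cons, hfc, pvOmin_some_zero]
      exact pvFold_zero_absorb f xs
    · exact ih _ ⟨c, hmem, hfc⟩

theorem pvOmin_map_succ (a b : Option Nat) :
    pvOmin (a.map (· + 1)) (b.map (· + 1)) = (pvOmin a b).map (· + 1) := by
  cases a <;> cases b <;> simp [pvOmin, Nat.add_min_add_right]

theorem pvFold_shift (f g : String → Option Nat) (items : List String) (acc : Option Nat)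
    (h : ∀ c ∈ items, f c = (g c).map (· + 1)) :
    items.foldl (fun best it => pvOmin best (f it)) (acc.map (· + 1)) =
      (items.foldl (fun best it => pvOmin best (g it)) acc).map (· + 1) := by
  induction items generalizing acc with
  | nil => rfl
  | cons x xs ih =>
    rw [List.foldl_cons, List.foldl_cons, h x (List.mem_cons_self ..), pvOmin_map_succ]
    exact ih (pvOmin acc (g x)) (fun c hc => h c (List.mem_cons_of_mem _ hc))

theorem pvMain (T : List (String × String)) (items : List String) :
    pvAFindFlat T items = (pvBestIdx T items).map (fun i => (T.getD i ("", "")).2) := by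
  induction T with
  | nil =>
    simp only [pvAFindFlat, pvBestIdx, pvFirstIdx]
    rw [pvFold_none]
    rfl
  | cons p rest ih =>
    obtain ⟨kw, nm⟩ := p
    by_cases h : items.any (fun it => PySem.Str.isIn kw (PySem.Str.lower it))
    · simp only [pvAFindFlat, h, if_true]
      have : pvBestIdx ((kw, nm) :: rest) items = some 0 := by
        apply pvFold_zero_wins
        rcases List.any_eq_true.mp h with ⟨c, hc, hkw⟩
        have hkw' : PySem.Chars.isIn kw.toList (PySem.Chars.lower c.toList) = true := by
          simpa using hkw
        exact ⟨c, hc, by simp [pvFirstIdx, hkw']⟩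
      rw [this]; rfl
    · simp only [pvAFindFlat, h, Bool.false_eq_true, if_false]
      have hall : ∀ c ∈ items, pvFirstIdx ((kw, nm) :: rest) (PySem.Str.lower c) =
          (pvFirstIdx rest (PySem.Str.lower c)).map (· + 1) := by
        intro c hc
        have hf : PySem.Str.isIn kw (PySem.Str.lower c) = false := by
          by_contra hne
          exact h (List.any_eq_true.mpr ⟨c, hc, by simpa using hne⟩)
        have hf' : PySem.Chars.isIn kw.toList (PySem.Chars.lower c.toList) = false := by
          simpa using hf
        simp [pvFirstIdx, hf']
      have hshift : pvBestIdx ((kw, nm) :: rest) items =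
          (pvBestIdx rest items).map (· + 1) := by
        unfold pvBestIdx
        have := pvFold_shift
          (fun c => pvFirstIdx ((kw, nm) :: rest) (PySem.Str.lower c))
          (fun c => pvFirstIdx rest (PySem.Str.lower c)) items none hall
        simpa using this
      rw [hshift, ih]
      cases pvBestIdx rest items <;> simp

theorem pvKwScan_flat (gt : String) (kws : List String) (items : List String) :
    pvKwScanA gt kws items =
      pvAFindFlat (kws.map (fun kw => (kw, (PySem.Dict.get? pvTypeNames gt).getD ""))) items := by
  induction kws with
  | nil => rfl
  | cons k ks ih => simp only [pvKwScanA, List.map_cons, pvAFindFlat, ih]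

theorem pvAFindFlat_append (T1 T2 : List (String × String)) (items : List String) :
    pvAFindFlat (T1 ++ T2) items =
      (match pvAFindFlat T1 items with | some r => some r | none => pvAFindFlat T2 items) := by
  induction T1 with
  | nil => rfl
  | cons p r ih =>
    obtain ⟨kw, nm⟩ := p
    by_cases h : items.any (fun it => PySem.Str.isIn kw (PySem.Str.lower it)) <;>
      simp only [List.cons_append, pvAFindFlat, h, if_true, Bool.false_eq_true, if_false, ih]

theorem pvCatScan_flat (L : List (String × List String)) (items : List String) :
    pvCatScanA L items =
      pvAFindFlat (L.flatMap fun p =>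
        p.2.map (fun kw => (kw, (PySem.Dict.get? pvTypeNames p.1).getD ""))) items := by
  induction L with
  | nil => rfl
  | cons p r ih =>
    obtain ⟨gt, kws⟩ := p
    simp only [pvCatScanA, List.flatMap_cons, pvAFindFlat_append, pvKwScan_flat, ih]

theorem pvMechScan_flat (T : List (String × String)) (items : List String) :
    pvMechScanA T items =
      (match pvAFindFlat T items with | some r => r | none => "Strategy") := by
  induction T with
  | nil => rfl
  | cons p r ih =>
    obtain ⟨kw, nm⟩ := p
    by_cases h : items.any (fun it => PySem.Str.isIn kw (PySem.Str.lower it)) <;>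
      simp only [pvMechScanA, pvAFindFlat, h, if_true, Bool.false_eq_true, if_false, ih]

-- A's category phase is the flat first-match scan over pvCatTable
theorem pvBridgeCat (categories : List String) :
    pvCatScanA pvPrimaryTypes categories = pvAFindFlat pvCatTable categories := by
  rw [pvCatScan_flat]
  have ht : (pvPrimaryTypes.flatMap fun p =>
      p.2.map (fun kw => (kw, (PySem.Dict.get? pvTypeNames p.1).getD ""))) = pvCatTable := by
    decide
  rw [ht]

-- A's cooperative check plus mechanic loop is the flat scan over pvMechTable with fallback
theorem pvBridgeMech (mechanics : List String) :
    (if mechanics.any (fun mech => PySem.Str.isIn "cooperative" (PySem.Str.lower mech)) then "Co-op"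
     else pvMechScanA pvMechanicPriority mechanics) =
    (match pvAFindFlat pvMechTable mechanics with | some r => r | none => "Strategy") := by
  have ht : pvMechTable = ("cooperative", "Co-op") :: pvMechanicPriority := rfl
  rw [ht]
  by_cases h : mechanics.any (fun mech => PySem.Str.isIn "cooperative" (PySem.Str.lower mech)) <;>
    simp only [pvAFindFlat, h, if_true, Bool.false_eq_true, if_false, pvMechScan_flat]

-- ===== VERDICT (by name: the statement is the Claim_ definition above) =====
theorem determine_game_type_py_spec : Claim_equal_determine_game_type_py := by
  intro categories mechanics _
  unfold Spec_determine_game_type_py determine_game_type_py determine_game_type_py_alt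
  rw [pvBridgeCat, pvMain pvCatTable categories]
  cases hc : pvBestIdx pvCatTable categories with
  | some i => rfl
  | none =>
    simp only [Option.map_none]
    rw [pvBridgeMech, pvMain pvMechTable mechanics]
    cases pvBestIdx pvMechTable mechanics <;> rfl
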